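-- pv_equiv track=rewrite | github.com/yuancafe/vis-studio | support/brand-production-orchestrator/scripts/build_pipeline.py | _resolve_requested_packages
-- ===== SOURCE A (Python) =====
-- from typing import Any
--
-- PACKAGE_ORDER = [
--     "logo_core_package",
--     "vector_extension_package",
--     "viis_manual_package",
--     "brand_prompt_pack",
--     "application_assets_package",
-- ]
--
-- FULL_SUITE_BASE_CHAIN = [
--     "logo_core_package",
--     "viis_manual_package",
--     "brand_prompt_pack",
-- ]
--
-- PACKAGE_DEPENDENCIES = {
--     "logo_core_package": [],
--     "vector_extension_package": ["logo_core_package"],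
--     "viis_manual_package": ["logo_core_package"],
--     "brand_prompt_pack": ["viis_manual_package"],
--     "application_assets_package": ["brand_prompt_pack"],
-- }
--
-- PACKAGE_TO_ROUTE = {
--     "logo_core_package": {
--         "intent": "logo_refinement",
--         "family": "logo-core",
--         "artifact_outputs": ["logo", "vector"],
--     },
--     "vector_extension_package": {
--         "intent": "open_source_vector_refinement",
--         "family": "vector-extension",
--         "artifact_outputs": ["vector"],
--     },
--     "viis_manual_package": {
--         "intent": "vis_handbook",
--         "family": "viis-manual",
--         "artifact_outputs": ["manual", "layout"],
--     },
--     "brand_prompt_pack": {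
--         "intent": "social_template_pack",
--         "family": "prompt-pack",
--         "artifact_outputs": ["prompt_pack"],
--     },
--     "application_assets_package": {
--         "intent": "social_template_pack",
--         "family": "application-assets",
--         "artifact_outputs": ["template", "mockup"],
--     },
-- }
--
-- def _dedupe_keep_order(values: list[str]) -> list[str]:
--     seen: set[str] = set()
--     output: list[str] = []
--     for value in values:
--         if value in seen:
--             continue
--         seen.add(value)
--         output.append(value)
--     return output
--
-- def _resolve_requested_packages(order_context: dict[str, Any], production_scope: str) -> list[str]:
--     requested = list(order_context.get("selected_deliverables", []))
--     if bool(order_context.get("auto_generate_application_assets", False)):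
--         requested.append("application_assets_package")
--     if production_scope == "full_suite":
--         requested = FULL_SUITE_BASE_CHAIN + requested
--
--     requested = [item for item in requested if item in PACKAGE_TO_ROUTE]
--     requested = _dedupe_keep_order(requested)
--
--     # Always pull required upstream dependencies.
--     selected: set[str] = set()
--
--     def add_with_deps(package: str) -> None:
--         if package in selected:
--             return
--         for dep in PACKAGE_DEPENDENCIES.get(package, []):
--             add_with_deps(dep)
--         selected.add(package)
--
--     for package in requested:
--         add_with_deps(package)
--
--     return [item for item in PACKAGE_ORDER if item in selected]
-- ===== SOURCE B (Python) =====
-- PACKAGE_ORDER = [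
--     "logo_core_package",
--     "vector_extension_package",
--     "viis_manual_package",
--     "brand_prompt_pack",
--     "application_assets_package",
-- ]
--
-- FULL_SUITE_BASE_CHAIN = [
--     "logo_core_package",
--     "viis_manual_package",
--     "brand_prompt_pack",
-- ]
--
-- PACKAGE_DEPENDENCIES = {
--     "logo_core_package": [],
--     "vector_extension_package": ["logo_core_package"],
--     "viis_manual_package": ["logo_core_package"],
--     "brand_prompt_pack": ["viis_manual_package"],
--     "application_assets_package": ["brand_prompt_pack"],
-- }
--
-- def _resolve_requested_packages(order_context, production_scope):
--     # Collect everything requested into one set, then close it under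
--     # dependencies with a single reverse sweep of PACKAGE_ORDER (which is
--     # topologically sorted: every dependency precedes its dependent).
--     needed = set(order_context.get("selected_deliverables", []))
--     if order_context.get("auto_generate_application_assets", False):
--         needed.add("application_assets_package")
--     if production_scope == "full_suite":
--         needed.update(FULL_SUITE_BASE_CHAIN)
--     for package in reversed(PACKAGE_ORDER):
--         if package in needed:
--             needed.update(PACKAGE_DEPENDENCIES[package])
--     return [p for p in PACKAGE_ORDER if p in needed]
-- ===== Notes on version B (the rewrite author's own statement) =====
-- stated objective: simpler
-- what changed: Replaces the recursive add_with_deps closure (plus the now-redundant route filter and order-preserving dedupe) with a single reverse sweep over the topologically sorted PACKAGE_ORDER that adds each selected package's dependencies into one set.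
import Mathlib
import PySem

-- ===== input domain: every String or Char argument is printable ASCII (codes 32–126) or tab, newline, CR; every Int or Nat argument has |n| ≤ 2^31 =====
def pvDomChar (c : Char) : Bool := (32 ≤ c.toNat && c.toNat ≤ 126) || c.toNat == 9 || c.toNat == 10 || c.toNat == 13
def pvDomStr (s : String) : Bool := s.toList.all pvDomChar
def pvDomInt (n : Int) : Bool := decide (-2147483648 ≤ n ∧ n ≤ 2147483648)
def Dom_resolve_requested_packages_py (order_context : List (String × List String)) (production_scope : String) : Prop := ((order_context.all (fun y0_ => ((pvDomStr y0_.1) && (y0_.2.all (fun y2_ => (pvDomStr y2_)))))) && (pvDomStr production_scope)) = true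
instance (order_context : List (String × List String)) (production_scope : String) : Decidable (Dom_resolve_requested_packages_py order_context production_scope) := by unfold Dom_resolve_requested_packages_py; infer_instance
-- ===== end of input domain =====

-- B replaces the recursive add_with_deps dependency closure (and the then-redundant
-- route filter and dedupe) by one reverse sweep over the topologically sorted
-- PACKAGE_ORDER; objective: simpler.

-- ===== PORT A =====
def PACKAGE_ORDER_py : List String :=
  ["logo_core_package", "vector_extension_package", "viis_manual_package",
   "brand_prompt_pack", "application_assets_package"]

def FULL_SUITE_BASE_CHAIN_py : List String :=
  ["logo_core_package", "viis_manual_package", "brand_prompt_pack"]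

def PACKAGE_DEPENDENCIES_py : PySem.Dict String (List String) :=
  PySem.Dict.mk
    [("logo_core_package", []),
     ("vector_extension_package", ["logo_core_package"]),
     ("viis_manual_package", ["logo_core_package"]),
     ("brand_prompt_pack", ["viis_manual_package"]),
     ("application_assets_package", ["brand_prompt_pack"])]

-- A only uses PACKAGE_TO_ROUTE through `item in PACKAGE_TO_ROUTE`; its values are
-- heterogeneous dicts, so only its key list is ported (exact for that membership test).
def PACKAGE_TO_ROUTE_keys : List String :=
  ["logo_core_package", "vector_extension_package", "viis_manual_package",
   "brand_prompt_pack", "application_assets_package"]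

def dedupe_keep_order (values : List String) : List String :=
  (values.foldl
    (fun (st : PySem.Set String × List String) value =>
      if PySem.Set.contains st.1 value then st
      else (PySem.Set.add st.1 value, st.2 ++ [value]))
    (PySem.Set.empty, [])).2

-- add_with_deps; the fuel only makes the (terminating) Python recursion total:
-- the dependency chains have length ≤ 4, so fuel 6 is never exhausted.
def addWithDeps : Nat → PySem.Set String → String → PySem.Set String
  | 0, selected, _ => selected
  | fuel + 1, selected, package =>
    if PySem.Set.contains selected package then selected
    else
      let selected :=
        (PySem.Dict.getD PACKAGE_DEPENDENCIES_py package []).foldl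
          (fun s dep => addWithDeps fuel s dep) selected
      PySem.Set.add selected package

def resolve_requested_packages_py (order_context : List (String × List String)) (production_scope : String) : List String :=
  let ctx := PySem.Dict.mk order_context
  let requested := PySem.Dict.getD ctx "selected_deliverables" []
  -- bool(order_context.get("auto_generate_application_assets", False)): the value is a
  -- list under the type convention, so truthiness is nonemptiness.
  let requested :=
    if !(PySem.Dict.getD ctx "auto_generate_application_assets" []).isEmpty
    then requested ++ ["application_assets_package"] else requested
  let requested :=
    if production_scope = "full_suite" then FULL_SUITE_BASE_CHAIN_py ++ requested
    else requested
  let requested := requested.filter (fun item => PACKAGE_TO_ROUTE_keys.contains item)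
  let requested := dedupe_keep_order requested
  let selected := requested.foldl (fun s p => addWithDeps 6 s p) PySem.Set.empty
  PACKAGE_ORDER_py.filter (fun item => PySem.Set.contains selected item)

-- ===== PORT B =====
def resolve_requested_packages_py_alt (order_context : List (String × List String)) (production_scope : String) : List String :=
  let ctx := PySem.Dict.mk order_context
  let needed := PySem.Set.ofList (PySem.Dict.getD ctx "selected_deliverables" [])
  let needed :=
    if !(PySem.Dict.getD ctx "auto_generate_application_assets" []).isEmpty
    then PySem.Set.add needed "application_assets_package" else needed
  let needed :=
    if production_scope = "full_suite" then PySem.Set.update needed FULL_SUITE_BASE_CHAIN_py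
    else needed
  -- PACKAGE_DEPENDENCIES[package]: every package of PACKAGE_ORDER is a key, so getD is exact.
  let needed :=
    PACKAGE_ORDER_py.reverse.foldl
      (fun n p =>
        if PySem.Set.contains n p then PySem.Set.update n (PySem.Dict.getD PACKAGE_DEPENDENCIES_py p [])
        else n)
      needed
  PACKAGE_ORDER_py.filter (fun p => PySem.Set.contains needed p)

-- ===== PRECONDITION & SPEC =====
def Spec_resolve_requested_packages_py (order_context : List (String × List String)) (production_scope : String) (out : List String) : Prop := out = resolve_requested_packages_py_alt order_context production_scope
instance (order_context : List (String × List String)) (production_scope : String) (out : List String) : Decidable (Spec_resolve_requested_packages_py order_context production_scope out) := by unfold Spec_resolve_requested_packages_py; infer_instance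

-- ===== CLAIM (what is proved, stated in full; the proofs are below) =====
def Claim_equal_resolve_requested_packages_py : Prop := ∀ (order_context : List (String × List String)) (production_scope : String), Dom_resolve_requested_packages_py order_context production_scope → Spec_resolve_requested_packages_py order_context production_scope (resolve_requested_packages_py order_context production_scope)

-- ===== LEMMAS AND PROOFS =====

-- closure list of each package (dependencies first), used only by the proofs
def closList : String → List String
  | "logo_core_package" => ["logo_core_package"]
  | "vector_extension_package" => ["logo_core_package", "vector_extension_package"]
  | "viis_manual_package" => ["logo_core_package", "viis_manual_package"]
  | "brand_prompt_pack" => ["logo_core_package", "viis_manual_package", "brand_prompt_pack"]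
  | "application_assets_package" =>
      ["logo_core_package", "viis_manual_package", "brand_prompt_pack", "application_assets_package"]
  | _ => []

def ClosedS (s : List String) : Prop :=
  ("vector_extension_package" ∈ s → "logo_core_package" ∈ s) ∧
  ("viis_manual_package" ∈ s → "logo_core_package" ∈ s) ∧
  ("brand_prompt_pack" ∈ s → "viis_manual_package" ∈ s) ∧
  ("application_assets_package" ∈ s → "brand_prompt_pack" ∈ s)

theorem mem_dedupe_aux (l : List String) (x : String) :
    ∀ st : PySem.Set String × List String, (∀ y, y ∈ st.1 ↔ y ∈ st.2) →
      (x ∈ (l.foldl (fun (st : PySem.Set String × List String) value =>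
        if PySem.Set.contains st.1 value then st
        else (PySem.Set.add st.1 value, st.2 ++ [value])) st).2 ↔ x ∈ st.2 ∨ x ∈ l) := by
  induction l with
  | nil => simp
  | cons v t ih =>
    intro st hinv
    simp only [List.foldl_cons]
    by_cases hc : PySem.Set.contains st.1 v = true
    · rw [if_pos hc]
      have hv : v ∈ st.2 := (hinv v).mp ((PySem.Set.contains_iff _ _).mp hc)
      rw [ih st hinv]
      constructor
      · rintro (h | h) <;> simp [h]
      · rintro (h | h)
        · exact Or.inl h
        · rcases List.mem_cons.mp h with rfl | h
          · exact Or.inl hv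
          · exact Or.inr h
    · rw [if_neg hc]
      have hinv' : ∀ y, y ∈ PySem.Set.add st.1 v ↔ y ∈ st.2 ++ [v] := by
        intro y; rw [PySem.Set.mem_add]; simp [hinv y]
      rw [ih _ hinv']
      simp; tauto

theorem mem_dedupe (l : List String) (x : String) : x ∈ dedupe_keep_order l ↔ x ∈ l := by
  unfold dedupe_keep_order
  rw [mem_dedupe_aux l x (PySem.Set.empty, []) (by simp [PySem.Set.empty])]
  simp


theorem aw_unfold (f : Nat) (s : PySem.Set String) (p : String) :
    addWithDeps (f + 1) s p =
      if PySem.Set.contains s p then s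
      else PySem.Set.add
        ((PySem.Dict.getD PACKAGE_DEPENDENCIES_py p []).foldl
          (fun s dep => addWithDeps f s dep) s) p := rfl

theorem aw_logo (f : Nat) (s : PySem.Set String) (x : String) :
    x ∈ addWithDeps (f + 1) s "logo_core_package" ↔ x ∈ s ∨ x = "logo_core_package" := by
  rw [aw_unfold]
  by_cases hc : PySem.Set.contains s "logo_core_package" = true
  · rw [if_pos hc]
    have hm := (PySem.Set.contains_iff _ _).mp hc
    constructor
    · exact Or.inl
    · rintro (h | rfl) <;> assumption
  · rw [if_neg hc]
    have hd : PySem.Dict.getD PACKAGE_DEPENDENCIES_py "logo_core_package" [] = [] := rfl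
    rw [hd]
    simp [PySem.Set.mem_add]

theorem aw_vector (f : Nat) (s : PySem.Set String) (hs : ClosedS s) (x : String) :
    x ∈ addWithDeps (f + 2) s "vector_extension_package" ↔
      x ∈ s ∨ x = "logo_core_package" ∨ x = "vector_extension_package" := by
  rw [aw_unfold]
  by_cases hc : PySem.Set.contains s "vector_extension_package" = true
  · rw [if_pos hc]
    have hm := (PySem.Set.contains_iff _ _).mp hc
    have hl := hs.1 hm
    constructor
    · exact Or.inl
    · rintro (h | rfl | rfl) <;> assumption
  · rw [if_neg hc]
    have hd : PySem.Dict.getD PACKAGE_DEPENDENCIES_py "vector_extension_package" [] = ["logo_core_package"] := rfl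
    rw [hd]
    simp only [List.foldl_cons, List.foldl_nil, PySem.Set.mem_add, aw_logo]
    tauto

theorem aw_viis (f : Nat) (s : PySem.Set String) (hs : ClosedS s) (x : String) :
    x ∈ addWithDeps (f + 2) s "viis_manual_package" ↔
      x ∈ s ∨ x = "logo_core_package" ∨ x = "viis_manual_package" := by
  rw [aw_unfold]
  by_cases hc : PySem.Set.contains s "viis_manual_package" = true
  · rw [if_pos hc]
    have hm := (PySem.Set.contains_iff _ _).mp hc
    have hl := hs.2.1 hm
    constructor
    · exact Or.inl
    · rintro (h | rfl | rfl) <;> assumption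
  · rw [if_neg hc]
    have hd : PySem.Dict.getD PACKAGE_DEPENDENCIES_py "viis_manual_package" [] = ["logo_core_package"] := rfl
    rw [hd]
    simp only [List.foldl_cons, List.foldl_nil, PySem.Set.mem_add, aw_logo]
    tauto

theorem aw_brand (f : Nat) (s : PySem.Set String) (hs : ClosedS s) (x : String) :
    x ∈ addWithDeps (f + 3) s "brand_prompt_pack" ↔
      x ∈ s ∨ x = "logo_core_package" ∨ x = "viis_manual_package" ∨ x = "brand_prompt_pack" := by
  rw [aw_unfold]
  by_cases hc : PySem.Set.contains s "brand_prompt_pack" = true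
  · rw [if_pos hc]
    have hm := (PySem.Set.contains_iff _ _).mp hc
    have hv := hs.2.2.1 hm
    have hl := hs.2.1 hv
    constructor
    · exact Or.inl
    · rintro (h | rfl | rfl | rfl) <;> assumption
  · rw [if_neg hc]
    have hd : PySem.Dict.getD PACKAGE_DEPENDENCIES_py "brand_prompt_pack" [] = ["viis_manual_package"] := rfl
    rw [hd]
    simp only [List.foldl_cons, List.foldl_nil, PySem.Set.mem_add, aw_viis _ _ hs]
    tauto

theorem aw_app (f : Nat) (s : PySem.Set String) (hs : ClosedS s) (x : String) :
    x ∈ addWithDeps (f + 4) s "application_assets_package" ↔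
      x ∈ s ∨ x = "logo_core_package" ∨ x = "viis_manual_package" ∨ x = "brand_prompt_pack" ∨
        x = "application_assets_package" := by
  rw [aw_unfold]
  by_cases hc : PySem.Set.contains s "application_assets_package" = true
  · rw [if_pos hc]
    have hm := (PySem.Set.contains_iff _ _).mp hc
    have hb := hs.2.2.2 hm
    have hv := hs.2.2.1 hb
    have hl := hs.2.1 hv
    constructor
    · exact Or.inl
    · rintro (h | rfl | rfl | rfl | rfl) <;> assumption
  · rw [if_neg hc]
    have hd : PySem.Dict.getD PACKAGE_DEPENDENCIES_py "application_assets_package" [] = ["brand_prompt_pack"] := rfl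
    rw [hd]
    simp only [List.foldl_cons, List.foldl_nil, PySem.Set.mem_add, aw_brand _ _ hs]
    tauto

theorem aw6_logo (s : PySem.Set String) (x : String) :
    x ∈ addWithDeps 6 s "logo_core_package" ↔ x ∈ s ∨ x = "logo_core_package" := aw_logo 5 s x

theorem aw6_vector (s : PySem.Set String) (hs : ClosedS s) (x : String) :
    x ∈ addWithDeps 6 s "vector_extension_package" ↔
      x ∈ s ∨ x = "logo_core_package" ∨ x = "vector_extension_package" := aw_vector 4 s hs x

theorem aw6_viis (s : PySem.Set String) (hs : ClosedS s) (x : String) :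
    x ∈ addWithDeps 6 s "viis_manual_package" ↔
      x ∈ s ∨ x = "logo_core_package" ∨ x = "viis_manual_package" := aw_viis 4 s hs x

theorem aw6_brand (s : PySem.Set String) (hs : ClosedS s) (x : String) :
    x ∈ addWithDeps 6 s "brand_prompt_pack" ↔
      x ∈ s ∨ x = "logo_core_package" ∨ x = "viis_manual_package" ∨ x = "brand_prompt_pack" :=
  aw_brand 3 s hs x

theorem aw6_app (s : PySem.Set String) (hs : ClosedS s) (x : String) :
    x ∈ addWithDeps 6 s "application_assets_package" ↔
      x ∈ s ∨ x = "logo_core_package" ∨ x = "viis_manual_package" ∨ x = "brand_prompt_pack" ∨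
        x = "application_assets_package" := aw_app 2 s hs x

theorem addWithDeps_key (p : String) (hp : p ∈ PACKAGE_TO_ROUTE_keys) (s : PySem.Set String)
    (hs : ClosedS s) :
    (∀ x, x ∈ addWithDeps 6 s p ↔ x ∈ s ∨ x ∈ closList p) ∧ ClosedS (addWithDeps 6 s p) := by
  simp only [PACKAGE_TO_ROUTE_keys, List.mem_cons, List.not_mem_nil, or_false] at hp
  rcases hp with rfl | rfl | rfl | rfl | rfl
  · refine ⟨fun x => by simp [aw6_logo, closList], ?_⟩
    unfold ClosedS at hs ⊢
    simp only [aw6_logo]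
    tauto
  · refine ⟨fun x => by simp [aw6_vector s hs, closList], ?_⟩
    unfold ClosedS at hs ⊢
    simp only [aw6_vector s hs]
    tauto
  · refine ⟨fun x => by simp [aw6_viis s hs, closList], ?_⟩
    unfold ClosedS at hs ⊢
    simp only [aw6_viis s hs]
    tauto
  · refine ⟨fun x => by simp [aw6_brand s hs, closList], ?_⟩
    unfold ClosedS at hs ⊢
    simp only [aw6_brand s hs]
    tauto
  · refine ⟨fun x => by simp [aw6_app s hs, closList], ?_⟩
    unfold ClosedS at hs ⊢
    simp only [aw6_app s hs]
    tauto

theorem foldl_addWithDeps (l : List String) (hl : ∀ p ∈ l, p ∈ PACKAGE_TO_ROUTE_keys) :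
    ∀ s : PySem.Set String, ClosedS s →
      (∀ x, x ∈ l.foldl (fun s p => addWithDeps 6 s p) s ↔ x ∈ s ∨ ∃ p ∈ l, x ∈ closList p) ∧
      ClosedS (l.foldl (fun s p => addWithDeps 6 s p) s) := by
  induction l with
  | nil => intro s hcl; simpa using hcl
  | cons p t ih =>
    intro s hcl
    have hp := hl p (List.mem_cons_self ..)
    have hkey := addWithDeps_key p hp s hcl
    have ht := ih (fun q hq => hl q (List.mem_cons_of_mem _ hq)) _ hkey.2
    refine ⟨fun x => ?_, ht.2⟩
    rw [List.foldl_cons, (ht.1 x), hkey.1 x, List.exists_mem_cons_iff]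
    tauto


theorem contains_congr (s t : List String) (x : String) (h : x ∈ s ↔ x ∈ t) :
    PySem.Set.contains s x = PySem.Set.contains t x := by
  by_cases hx : x ∈ s
  · rw [(PySem.Set.contains_iff _ _).mpr hx, (PySem.Set.contains_iff _ _).mpr (h.mp hx)]
  · have h1 : PySem.Set.contains s x = false := by
      cases hcs : PySem.Set.contains s x
      · rfl
      · exact absurd ((PySem.Set.contains_iff _ _).mp hcs) hx
    have h2 : PySem.Set.contains t x = false := by
      cases hct : PySem.Set.contains t x
      · rfl
      · exact absurd ((PySem.Set.contains_iff _ _).mp hct) (fun hh => hx (h.mpr hh))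
    rw [h1, h2]

theorem bstep (n : PySem.Set String) (p : String) (d : List String) (x : String) :
    (x ∈ (if PySem.Set.contains n p = true then PySem.Set.update n d else n)) ↔
      x ∈ n ∨ (p ∈ n ∧ x ∈ d) := by
  by_cases hc : PySem.Set.contains n p = true
  · rw [if_pos hc, PySem.Set.mem_update]
    have := (PySem.Set.contains_iff _ _).mp hc
    tauto
  · rw [if_neg hc]
    have : p ∉ n := fun hm => hc ((PySem.Set.contains_iff _ _).mpr hm)
    tauto

theorem B_mem (n : PySem.Set String) (x : String) :
    x ∈ PACKAGE_ORDER_py.reverse.foldl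
        (fun n p =>
          if PySem.Set.contains n p then PySem.Set.update n (PySem.Dict.getD PACKAGE_DEPENDENCIES_py p [])
          else n) n ↔
      x ∈ n ∨ ("application_assets_package" ∈ n ∧ x = "brand_prompt_pack") ∨
        (("brand_prompt_pack" ∈ n ∨ "application_assets_package" ∈ n) ∧ x = "viis_manual_package") ∨
        (("viis_manual_package" ∈ n ∨ "brand_prompt_pack" ∈ n ∨ "application_assets_package" ∈ n) ∧
          x = "logo_core_package") ∨
        ("vector_extension_package" ∈ n ∧ x = "logo_core_package") := by
  have hrev : PACKAGE_ORDER_py.reverse =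
      ["application_assets_package", "brand_prompt_pack", "viis_manual_package",
       "vector_extension_package", "logo_core_package"] := rfl
  rw [hrev]
  simp only [List.foldl_cons, List.foldl_nil]
  have d1 : PySem.Dict.getD PACKAGE_DEPENDENCIES_py "application_assets_package" [] = ["brand_prompt_pack"] := rfl
  have d2 : PySem.Dict.getD PACKAGE_DEPENDENCIES_py "brand_prompt_pack" [] = ["viis_manual_package"] := rfl
  have d3 : PySem.Dict.getD PACKAGE_DEPENDENCIES_py "viis_manual_package" [] = ["logo_core_package"] := rfl
  have d4 : PySem.Dict.getD PACKAGE_DEPENDENCIES_py "vector_extension_package" [] = ["logo_core_package"] := rfl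
  have d5 : PySem.Dict.getD PACKAGE_DEPENDENCIES_py "logo_core_package" [] = [] := rfl
  rw [d1, d2, d3, d4, d5]
  simp only [bstep, List.mem_singleton, List.not_mem_nil, and_false, or_false]
  tauto

theorem closed_empty : ClosedS PySem.Set.empty := by
  simp [ClosedS, PySem.Set.empty]

theorem A_mem (r : List String) (x : String) :
    x ∈ (dedupe_keep_order (r.filter (fun item => PACKAGE_TO_ROUTE_keys.contains item))).foldl
        (fun s p => addWithDeps 6 s p) PySem.Set.empty ↔
      ∃ p ∈ r, p ∈ PACKAGE_TO_ROUTE_keys ∧ x ∈ closList p := by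
  have hl : ∀ p ∈ dedupe_keep_order (r.filter (fun item => PACKAGE_TO_ROUTE_keys.contains item)),
      p ∈ PACKAGE_TO_ROUTE_keys := by
    intro p hp
    rw [mem_dedupe] at hp
    have := List.of_mem_filter hp
    simpa using this
  rw [(foldl_addWithDeps _ hl PySem.Set.empty closed_empty).1 x]
  simp only [PySem.Set.empty, List.not_mem_nil, false_or]
  constructor
  · rintro ⟨p, hp, hx⟩
    rw [mem_dedupe] at hp
    exact ⟨p, (List.mem_filter.mp hp).1, by simpa using (List.mem_filter.mp hp).2, hx⟩
  · rintro ⟨p, hpr, hpk, hx⟩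
    exact ⟨p, (mem_dedupe _ _).mpr (List.mem_filter.mpr ⟨hpr, by simpa using hpk⟩), hx⟩

theorem key_clos_split (r : List String) (x : String) :
    (∃ p ∈ r, p ∈ PACKAGE_TO_ROUTE_keys ∧ x ∈ closList p) ↔
      ("logo_core_package" ∈ r ∧ x = "logo_core_package") ∨
      ("vector_extension_package" ∈ r ∧ (x = "logo_core_package" ∨ x = "vector_extension_package")) ∨
      ("viis_manual_package" ∈ r ∧ (x = "logo_core_package" ∨ x = "viis_manual_package")) ∨
      ("brand_prompt_pack" ∈ r ∧
        (x = "logo_core_package" ∨ x = "viis_manual_package" ∨ x = "brand_prompt_pack")) ∨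
      ("application_assets_package" ∈ r ∧
        (x = "logo_core_package" ∨ x = "viis_manual_package" ∨ x = "brand_prompt_pack" ∨
          x = "application_assets_package")) := by
  constructor
  · rintro ⟨p, hpr, hpk, hx⟩
    simp only [PACKAGE_TO_ROUTE_keys, List.mem_cons, List.not_mem_nil, or_false] at hpk
    rcases hpk with rfl | rfl | rfl | rfl | rfl <;> simp only [closList] at hx <;> simp at hx <;> tauto
  · rintro (⟨hr, hx⟩ | ⟨hr, hx⟩ | ⟨hr, hx⟩ | ⟨hr, hx⟩ | ⟨hr, hx⟩)
    · exact ⟨_, hr, by simp [PACKAGE_TO_ROUTE_keys], by simp [closList]; tauto⟩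
    · exact ⟨_, hr, by simp [PACKAGE_TO_ROUTE_keys], by simp [closList]; tauto⟩
    · exact ⟨_, hr, by simp [PACKAGE_TO_ROUTE_keys], by simp [closList]; tauto⟩
    · exact ⟨_, hr, by simp [PACKAGE_TO_ROUTE_keys], by simp [closList]; tauto⟩
    · exact ⟨_, hr, by simp [PACKAGE_TO_ROUTE_keys], by simp [closList]; tauto⟩

-- ===== VERDICT (by name: the statement is the Claim_ definition above) =====
theorem resolve_requested_packages_py_spec : Claim_equal_resolve_requested_packages_py := by
  intro oc ps _
  unfold Spec_resolve_requested_packages_py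
  unfold resolve_requested_packages_py resolve_requested_packages_py_alt
  simp only []
  apply List.filter_congr
  intro item hitem
  apply contains_congr
  rw [A_mem, key_clos_split, B_mem]
  by_cases ha : (!(PySem.Dict.getD (PySem.Dict.mk oc) "auto_generate_application_assets" []).isEmpty) = true <;>
    by_cases hfs : ps = "full_suite" <;>
      simp only [ha, hfs, if_pos, if_false, Bool.false_eq_true] <;>
        (simp [PACKAGE_ORDER_py] at hitem;
         rcases hitem with rfl | rfl | rfl | rfl | rfl <;>
           (simp [FULL_SUITE_BASE_CHAIN_py, PySem.Set.mem_add, PySem.Set.mem_ofList,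
              List.mem_append]
            <;> tauto))
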